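-- pv_equiv track=rewrite | github.com/PavelPutyato/python | Lesson3/Lesson3_5.py | func
-- ===== SOURCE A (Python) =====
-- def func(arg1):
--     number_sum = 0
--     i = True
--     for el in arg1:
--         if el.isdigit():
--             number_sum += int(el)
--         elif el == 'q':
--             i = False
--     return number_sum, i
-- ===== SOURCE B (Python) =====
-- def func(arg1):
--     chars = list(arg1)
--     total = sum(v * chars.count(ch) for v, ch in enumerate("0123456789"))
--     return total, chars.count('q') == 0
-- ===== Notes on version B (the rewrite author's own statement) =====
-- stated objective: alternative
-- what changed: Replaces A's single stateful scan carrying (sum, flag) with a frequency-based computation: the digit total becomes a weighted sum of per-digit-character occurrence counts and the flag becomes a zero-occurrence test on the letter q, with no per-character isdigit/int conversion left.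
import Mathlib
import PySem

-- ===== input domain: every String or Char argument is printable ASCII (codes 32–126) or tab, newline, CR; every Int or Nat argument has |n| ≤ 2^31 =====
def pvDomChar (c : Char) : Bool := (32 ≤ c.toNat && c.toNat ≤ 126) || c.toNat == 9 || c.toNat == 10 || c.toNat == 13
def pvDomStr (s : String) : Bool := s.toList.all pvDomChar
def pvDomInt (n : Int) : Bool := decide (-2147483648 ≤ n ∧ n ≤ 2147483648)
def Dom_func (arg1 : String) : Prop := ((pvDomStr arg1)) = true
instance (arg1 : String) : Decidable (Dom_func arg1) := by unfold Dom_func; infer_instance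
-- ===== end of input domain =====

-- B replaces A's single stateful scan with a frequency computation: a weighted sum of
-- per-digit occurrence counts, and 'count of q = 0' for the flag; objective: alternative.

-- ===== PORT A =====
def func (arg1 : String) : Int × Bool :=
  arg1.toList.foldl
    (fun (st : Int × Bool) el =>
      if PySem.Chars.isdigit el then (st.1 + (PySem.Int.ofChars? [el]).getD 0, st.2)
      else if el = 'q' then (st.1, false)
      else st)
    (0, true)

-- ===== PORT B =====
def func_alt (arg1 : String) : Int × Bool :=
  ((PySem.List.enumerate "0123456789".toList).foldl
      (fun (acc : Int) p => acc + p.1 * (arg1.toList.count p.2 : Int)) 0,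
   arg1.toList.count 'q' == 0)

-- ===== PRECONDITION & SPEC =====
def Spec_func (arg1 : String) (out : Int × Bool) : Prop := out = func_alt arg1
instance (arg1 : String) (out : Int × Bool) : Decidable (Spec_func arg1 out) := by unfold Spec_func; infer_instance

-- ===== CLAIM (what is proved, stated in full; the proofs are below) =====
def Claim_equal_func : Prop := ∀ (arg1 : String), Dom_func arg1 → Spec_func arg1 (func arg1)

-- ===== LEMMAS AND PROOFS =====

-- value of one digit character, as port A computes it
def pvDigitVal (el : Char) : Int := (PySem.Int.ofChars? [el]).getD 0

lemma pv_dv0 : pvDigitVal '0' = 0 := by decide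
lemma pv_dv1 : pvDigitVal '1' = 1 := by decide
lemma pv_dv2 : pvDigitVal '2' = 2 := by decide
lemma pv_dv3 : pvDigitVal '3' = 3 := by decide
lemma pv_dv4 : pvDigitVal '4' = 4 := by decide
lemma pv_dv5 : pvDigitVal '5' = 5 := by decide
lemma pv_dv6 : pvDigitVal '6' = 6 := by decide
lemma pv_dv7 : pvDigitVal '7' = 7 := by decide
lemma pv_dv8 : pvDigitVal '8' = 8 := by decide
lemma pv_dv9 : pvDigitVal '9' = 9 := by decide

lemma pv_foldl_add_shift (l : List Char) (a : Int) :
    l.foldl (fun (x : Int) el => x + pvDigitVal el) a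
      = a + l.foldl (fun (x : Int) el => x + pvDigitVal el) 0 := by
  induction l generalizing a with
  | nil => simp
  | cons c l ih =>
    simp only [List.foldl_cons]
    rw [ih (a + pvDigitVal c), ih (0 + pvDigitVal c)]
    ring

-- A's loop, characterised: digit sum of the digit characters, and 'no q seen'
lemma pv_loop (l : List Char) (s : Int) (b : Bool) :
    l.foldl
      (fun (st : Int × Bool) el =>
        if PySem.Chars.isdigit el then (st.1 + pvDigitVal el, st.2)
        else if el = 'q' then (st.1, false)
        else st)
      (s, b)
    = (s + (l.filter (fun el => PySem.Chars.isdigit el)).foldl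
            (fun (x : Int) el => x + pvDigitVal el) 0,
       b && !(l.contains 'q')) := by
  induction l generalizing s b with
  | nil => simp
  | cons c l ih =>
    by_cases hd : PySem.Chars.isdigit c
    · have hq : c ≠ 'q' := by
        intro h; rw [h] at hd; exact absurd hd (by decide)
      have hqc : ('q' == c) = false := by simp [Ne.symm hq]
      simp only [List.foldl_cons, List.filter_cons, hd, if_pos, ih]
      rw [pv_foldl_add_shift (List.filter (fun el => PySem.Chars.isdigit el) l) (0 + pvDigitVal c)]
      simp only [List.contains_cons, hqc, Bool.false_or, Prod.mk.injEq]
      constructor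
      · ring
      · trivial
    · by_cases hq : c = 'q'
      · subst hq
        simp [List.foldl_cons, hd, ih]
      · simp [List.foldl_cons, hd, hq, Ne.symm hq, ih]

-- B's weighted count sum, and its closed expansion over the literal digit list
def pvEnumSum (l : List Char) : Int :=
  (PySem.List.enumerate "0123456789".toList).foldl
    (fun (acc : Int) p => acc + p.1 * (l.count p.2 : Int)) 0

lemma pv_enum_expand (l : List Char) :
    pvEnumSum l
      = 0 + 0 * (l.count '0' : Int) + 1 * (l.count '1' : Int) + 2 * (l.count '2' : Int)
        + 3 * (l.count '3' : Int) + 4 * (l.count '4' : Int) + 5 * (l.count '5' : Int)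
        + 6 * (l.count '6' : Int) + 7 * (l.count '7' : Int) + 8 * (l.count '8' : Int)
        + 9 * (l.count '9' : Int) := rfl

-- a char accepted by isdigit is one of the ten ASCII digits
lemma pv_digit_cases (c : Char) (h : PySem.Chars.isdigit c = true) :
    c = '0' ∨ c = '1' ∨ c = '2' ∨ c = '3' ∨ c = '4' ∨
    c = '5' ∨ c = '6' ∨ c = '7' ∨ c = '8' ∨ c = '9' := by
  have h1 : 48 ≤ c.toNat ∧ c.toNat ≤ 57 := by
    simp only [PySem.Chars.isdigit, Bool.and_eq_true, decide_eq_true_eq, Char.le_def] at h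
    exact ⟨h.1, h.2⟩
  obtain ⟨hl, hr⟩ := h1
  have hofn : ∀ n : Nat, c.toNat = n → c = Char.ofNat n := by
    intro n hn
    have h2 := Char.ofNat_toNat c
    rw [hn] at h2
    exact h2.symm
  interval_cases hc : c.toNat <;> (rw [hofn _ rfl]; decide)

-- one step of B's sum: the head contributes its digit value (0 if not a digit)
lemma pv_enum_step (c : Char) (l : List Char) :
    pvEnumSum (c :: l)
      = (if PySem.Chars.isdigit c then pvDigitVal c else 0) + pvEnumSum l := by
  rw [pv_enum_expand, pv_enum_expand]
  simp only [List.count_cons]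
  by_cases hd : PySem.Chars.isdigit c
  · rcases pv_digit_cases c hd with rfl|rfl|rfl|rfl|rfl|rfl|rfl|rfl|rfl|rfl <;>
      simp [hd, pv_dv0, pv_dv1, pv_dv2, pv_dv3, pv_dv4, pv_dv5, pv_dv6, pv_dv7, pv_dv8, pv_dv9] <;>
      push_cast <;> ring
  · have h0 : ∀ d : Char, PySem.Chars.isdigit d = true → (c == d) = false := by
      intro d hdd
      by_cases h : c = d
      · subst h; rw [hdd] at hd; exact absurd rfl hd
      · simp [h]
    rw [h0 '0' (by decide), h0 '1' (by decide), h0 '2' (by decide), h0 '3' (by decide),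
        h0 '4' (by decide), h0 '5' (by decide), h0 '6' (by decide), h0 '7' (by decide),
        h0 '8' (by decide), h0 '9' (by decide)]
    simp [hd]

-- B's weighted count sum equals A's filtered digit sum
lemma pv_sum_eq (l : List Char) :
    pvEnumSum l
      = (l.filter (fun el => PySem.Chars.isdigit el)).foldl
          (fun (x : Int) el => x + pvDigitVal el) 0 := by
  induction l with
  | nil => rfl
  | cons c l ih =>
    rw [pv_enum_step]
    by_cases hd : PySem.Chars.isdigit c
    · simp only [List.filter_cons, hd, if_pos, List.foldl_cons]
      rw [pv_foldl_add_shift, ih]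
      ring
    · simp [List.filter_cons, hd, ih]

lemma pv_count_q (l : List Char) : (l.count 'q' == 0) = !(l.contains 'q') := by
  by_cases h : 'q' ∈ l
  · have : l.count 'q' ≠ 0 := by simp [List.count_eq_zero, h]
    simp [h, this]
  · have : l.count 'q' = 0 := by simp [List.count_eq_zero, h]
    simp [h, this]

-- ===== VERDICT (by name: the statement is the Claim_ definition above) =====
theorem func_spec : Claim_equal_func := by
  intro arg1 _
  show func arg1 = func_alt arg1
  unfold func func_alt
  have h := pv_loop arg1.toList 0 true
  simp only [pvDigitVal] at h
  rw [h]
  have hs := pv_sum_eq arg1.toList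
  simp only [pvEnumSum, pvDigitVal] at hs
  rw [hs]
  have hq := pv_count_q arg1.toList
  rw [hq]
  simp
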